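-- pv_equiv track=rewrite | github.com/sahko123/DITz | utils.py | clean_unmatched_braces
-- ===== SOURCE A (Python) =====
-- def clean_unmatched_braces(template: str) -> str:
--         """
--         Cleans a template string by removing unmatched braces
--         to prevent string.Formatter from throwing errors.
--         """
--         result = []
--         brace_stack = 0
--
--         for i, char in enumerate(template):
--             if char == '{':
--                 brace_stack += 1
--                 result.append(char)
--             elif char == '}':
--                 if brace_stack > 0:
--                     brace_stack -= 1
--                     result.append(char)
--                 # else: skip unmatched closing brace
--             else:
--                 result.append(char)
--
--         # Remove unmatched opening braces from end
--         cleaned = ''.join(result)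
--         while cleaned.count('{') > cleaned.count('}'):
--             cleaned = cleaned.rsplit('{', 1)[0] + cleaned.rsplit('{', 1)[-1].replace('{', '')
--         return cleaned
-- ===== SOURCE B (Python) =====
-- def clean_unmatched_braces(template: str) -> str:
--     """
--     Same cleanup as A but linear: a template without braces is returned
--     unchanged (no per-character work); otherwise one forward pass drops
--     unmatched '}' and one backward pass drops the last `opens` '{'.
--     """
--     if '{' not in template and '}' not in template:
--         return template
--     out = []
--     opens = 0
--     for ch in template:
--         if ch == '{':
--             opens += 1
--         elif ch == '}':
--             if opens == 0:
--                 continue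
--             opens -= 1
--         out.append(ch)
--     res = []
--     k = opens
--     for ch in reversed(out):
--         if k and ch == '{':
--             k -= 1
--         else:
--             res.append(ch)
--     return ''.join(reversed(res))
-- ===== Notes on version B (the rewrite author's own statement) =====
-- stated objective: faster
-- what changed: A's quadratic post-loop (repeatedly recounting braces and rebuilding the string via rsplit to delete one trailing '{' per iteration) is replaced by a single right-to-left pass that skips the last `opens` unmatched '{' characters, and a brace-free template is returned unchanged after two C-speed substring tests instead of being rebuilt character by character.
import Mathlib
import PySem

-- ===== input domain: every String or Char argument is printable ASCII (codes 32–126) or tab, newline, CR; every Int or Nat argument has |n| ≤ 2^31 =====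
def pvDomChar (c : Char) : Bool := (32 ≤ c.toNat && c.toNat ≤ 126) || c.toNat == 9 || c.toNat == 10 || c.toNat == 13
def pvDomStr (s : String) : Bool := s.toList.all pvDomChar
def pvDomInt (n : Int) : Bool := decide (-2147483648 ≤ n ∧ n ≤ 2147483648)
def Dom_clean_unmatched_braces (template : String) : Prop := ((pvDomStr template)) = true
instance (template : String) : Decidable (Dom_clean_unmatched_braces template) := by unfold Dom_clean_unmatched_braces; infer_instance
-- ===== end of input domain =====

-- B replaces A's quadratic trailing-'{'-deletion loop by one linear right-to-left pass (objective: faster).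

-- ===== PORT A =====

-- loop body of A's first pass (state: result list, brace_stack); index of enumerate unused
def pvLoopA (st : List Char × Int) (ic : Int × Char) : List Char × Int :=
  if ic.2 = '{' then (st.1 ++ [ic.2], st.2 + 1)
  else if ic.2 = '}' then
    if st.2 > 0 then (st.1 ++ [ic.2], st.2 - 1) else st
  else (st.1 ++ [ic.2], st.2)

-- hand port of locating the split point of str.rsplit(sep, 1): first sep of the reversed list
-- (exact: some (a, b) ⟺ reversed string = a ++ sep :: b with sep ∉ a; none ⟺ sep absent)
def pvSplitFirst (sep : Char) : List Char → Option (List Char × List Char)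
  | [] => none
  | c :: cs =>
    if c = sep then some ([], cs)
    else (pvSplitFirst sep cs).map (fun p => (c :: p.1, p.2))

-- cleaned.rsplit('{', 1): some (before, after) split at the LAST sep, none if sep absent
def pvRsplit1 (cs : List Char) (sep : Char) : Option (List Char × List Char) :=
  match pvSplitFirst sep cs.reverse with
  | some p => some (p.2.reverse, p.1.reverse)
  | none => none

-- one iteration of A's while body: rsplit('{',1)[0] + rsplit('{',1)[-1].replace('{','')
-- (str.replace('{','') deletes every '{'; filter (· != '{') is exactly that;
--  when '{' is absent rsplit gives the one-element list, so [0] and [-1] are both cs)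
def pvStepA (cs : List Char) : List Char :=
  match pvRsplit1 cs '{' with
  | some p => p.1 ++ p.2.filter (· != '{')
  | none => cs ++ cs.filter (· != '{')

theorem pvSplitFirst_some {sep : Char} : ∀ {l a b : List Char},
    pvSplitFirst sep l = some (a, b) → l = a ++ sep :: b ∧ sep ∉ a := by
  intro l
  induction l with
  | nil => intro a b h; simp [pvSplitFirst] at h
  | cons c cs ih =>
    intro a b h
    by_cases hc : c = sep
    · simp [pvSplitFirst, hc] at h
      obtain ⟨ha, hb⟩ := h
      subst ha; subst hb; subst hc; simp
    · rw [pvSplitFirst, if_neg hc] at h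
      cases hs : pvSplitFirst sep cs with
      | none => rw [hs] at h; simp at h
      | some p =>
        obtain ⟨p1, p2⟩ := p
        rw [hs] at h
        simp only [Option.map_some, Option.some.injEq, Prod.mk.injEq] at h
        obtain ⟨ha, hb⟩ := h
        obtain ⟨h1, h2⟩ := ih (a := p1) (b := p2) hs
        subst ha; subst hb
        refine ⟨by simp [h1], ?_⟩
        simp only [List.mem_cons, not_or]
        exact ⟨fun h' => hc h'.symm, h2⟩

theorem pvSplitFirst_none {sep : Char} : ∀ {l : List Char},
    pvSplitFirst sep l = none → sep ∉ l := by
  intro l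
  induction l with
  | nil => intro _; simp
  | cons c cs ih =>
    intro h
    by_cases hc : c = sep
    · simp [pvSplitFirst, hc] at h
    · rw [pvSplitFirst, if_neg hc] at h
      cases hs : pvSplitFirst sep cs with
      | none =>
        simp only [List.mem_cons, not_or]
        exact ⟨fun h' => hc h'.symm, ih hs⟩
      | some p => rw [hs] at h; simp at h

-- decomposition of one while-body step when a '{' is present (used for termination and the proof)
theorem pvStep_decomp {cs : List Char} (h : 0 < cs.count '{') :
    ∃ a b : List Char, cs.reverse = a ++ '{' :: b ∧ '{' ∉ a ∧ pvStepA cs = b.reverse ++ a.reverse := by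
  have hm : '{' ∈ cs.reverse := by
    rw [List.mem_reverse]; exact List.count_pos_iff.mp h
  cases hs : pvSplitFirst '{' cs.reverse with
  | none => exact absurd hm (pvSplitFirst_none hs)
  | some p =>
    obtain ⟨h1, h2⟩ := pvSplitFirst_some hs
    refine ⟨p.1, p.2, h1, h2, ?_⟩
    have hf : (p.1.reverse.filter (· != '{')) = p.1.reverse := by
      apply List.filter_eq_self.mpr
      intro x hx
      have : x ∈ p.1 := by simpa using hx
      have : x ≠ '{' := fun he => h2 (he ▸ this)
      simpa using this
    simp [pvStepA, pvRsplit1, hs, hf]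

theorem pvStepA_count_brace {cs : List Char} (h : 0 < cs.count '{') :
    (pvStepA cs).count '{' + 1 = cs.count '{' := by
  obtain ⟨a, b, h1, _, h3⟩ := pvStep_decomp h
  have : cs.reverse.count '{' = cs.count '{' := List.count_reverse ..
  rw [h1] at this
  rw [h3]
  simp only [List.count_append, List.count_cons, List.count_reverse] at *
  simp at this ⊢
  omega

-- A's while loop: cleaned.count('{') / cleaned.count('}') are single-char substring counts = char counts
def pvRemoveLoop (cs : List Char) : List Char :=
  if _h : cs.count '{' > cs.count '}' then pvRemoveLoop (pvStepA cs) else cs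
termination_by cs.count '{'
decreasing_by
  have := pvStepA_count_brace (cs := cs) (by omega)
  omega

def clean_unmatched_braces (template : String) : String :=
  let st := (PySem.List.enumerate template.toList).foldl pvLoopA ([], 0)
  String.mk (pvRemoveLoop st.1)

-- ===== PORT B =====

-- forward pass: drop unmatched '}', count open '{'
def pvPass1 (opens : Int) : List Char → List Char × Int
  | [] => ([], opens)
  | c :: cs =>
    if c = '{' then
      let r := pvPass1 (opens + 1) cs
      (c :: r.1, r.2)
    else if c = '}' then
      if opens = 0 then pvPass1 opens cs
      else
        let r := pvPass1 (opens - 1) cs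
        (c :: r.1, r.2)
    else
      let r := pvPass1 opens cs
      (c :: r.1, r.2)

-- '{' not in template / '}' not in template: substring membership tests
-- backward pass over reversed(out): skip the first k '{' met, cons-accumulate the rest
-- (cons-building the accumulator realises Python's append-then-reverse)
def pvDropOpens (k : Int) (acc : List Char) : List Char → List Char
  | [] => acc
  | c :: rest =>
    if k ≠ 0 ∧ c = '{' then pvDropOpens (k - 1) acc rest
    else pvDropOpens k (c :: acc) rest

def clean_unmatched_braces_alt (template : String) : String :=
  if PySem.Chars.isIn ['{'] template.toList = false ∧ PySem.Chars.isIn ['}'] template.toList = false then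
    template
  else
    let p := pvPass1 0 template.toList
    String.mk (pvDropOpens p.2 [] p.1.reverse)

-- ===== PRECONDITION & SPEC =====
def Spec_clean_unmatched_braces (template : String) (out : String) : Prop := out = clean_unmatched_braces_alt template
instance (template : String) (out : String) : Decidable (Spec_clean_unmatched_braces template out) := by unfold Spec_clean_unmatched_braces; infer_instance

-- ===== CLAIM (what is proved, stated in full; the proofs are below) =====
def Claim_equal_clean_unmatched_braces : Prop := ∀ (template : String), Dom_clean_unmatched_braces template → Spec_clean_unmatched_braces template (clean_unmatched_braces template)

-- ===== LEMMAS AND PROOFS =====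

theorem pvNotMem_of_isIn_false {c : Char} {l : List Char}
    (h : PySem.Chars.isIn [c] l = false) : c ∉ l := by
  intro hm
  obtain ⟨s, t, rfl⟩ := List.append_of_mem hm
  exact (PySem.Chars.isIn_eq_false_iff _ _).mp h ⟨s, t, by simp⟩

theorem pvPass1_no_brace : ∀ (l : List Char), '{' ∉ l → '}' ∉ l →
    ∀ s : Int, pvPass1 s l = (l, s) := by
  intro l
  induction l with
  | nil => intro _ _ s; rfl
  | cons c cs ih =>
    intro h1 h2 s
    simp only [List.mem_cons, not_or] at h1 h2
    have hc1 : ¬ c = '{' := fun h => h1.1 h.symm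
    have hc2 : ¬ c = '}' := fun h => h2.1 h.symm
    simp [pvPass1, hc1, hc2, ih h1.2 h2.2]

theorem pvStepA_count_close {cs : List Char} (h : 0 < cs.count '{') :
    (pvStepA cs).count '}' = cs.count '}' := by
  obtain ⟨a, b, h1, _, h3⟩ := pvStep_decomp h
  have : cs.reverse.count '}' = cs.count '}' := List.count_reverse ..
  rw [h1] at this
  rw [h3]
  simp only [List.count_append, List.count_cons, List.count_reverse] at *
  simp at this ⊢
  omega


-- proof-side model of the backward pass: the list with the first k '{' removed
def pvSkip (k : Int) : List Char → List Char
  | [] => []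
  | c :: cs => if k ≠ 0 ∧ c = '{' then pvSkip (k - 1) cs else c :: pvSkip k cs

theorem pvSkip_zero : ∀ l : List Char, pvSkip 0 l = l := by
  intro l; induction l with
  | nil => rfl
  | cons c cs ih => simp [pvSkip, ih]

theorem pvSkip_append {a : List Char} (ha : '{' ∉ a) :
    ∀ (k : Int) (l : List Char), pvSkip k (a ++ l) = a ++ pvSkip k l := by
  induction a with
  | nil => intro k l; rfl
  | cons c cs ih =>
    intro k l
    have hc : c ≠ '{' := fun h => ha (h ▸ List.mem_cons_self ..)
    have hm : '{' ∉ cs := fun h => ha (List.mem_cons_of_mem _ h)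
    simp [pvSkip, hc, ih hm]

theorem pvDropOpens_eq : ∀ (l : List Char) (k : Int) (acc : List Char),
    pvDropOpens k acc l = (pvSkip k l).reverse ++ acc := by
  intro l
  induction l with
  | nil => intro k acc; simp [pvDropOpens, pvSkip]
  | cons c cs ih =>
    intro k acc
    by_cases hg : k ≠ 0 ∧ c = '{'
    · simp [pvDropOpens, pvSkip, hg, ih]
    · simp [pvDropOpens, pvSkip, hg, ih]

theorem pvRemoveLoop_eq (n : Nat) : ∀ cs : List Char, cs.count '{' = n →
    cs.count '}' ≤ cs.count '{' →
    pvRemoveLoop cs = (pvSkip ((cs.count '{' : Int) - (cs.count '}' : Int)) cs.reverse).reverse := by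
  induction n using Nat.strong_induction_on with
  | _ n ih =>
    intro cs hn hle
    rw [pvRemoveLoop]
    by_cases hg : cs.count '{' > cs.count '}'
    · rw [dif_pos hg]
      have hpos : 0 < cs.count '{' := by omega
      obtain ⟨a, b, hrev, hna, hstep⟩ := pvStep_decomp hpos
      have hc1 := pvStepA_count_brace hpos
      have hc2 := pvStepA_count_close hpos
      rw [ih ((pvStepA cs).count '{') (by omega) _ rfl (by omega)]
      have hsr : (pvStepA cs).reverse = a ++ b := by rw [hstep]; simp
      rw [hsr, hrev, hc2]
      have hd : ((pvStepA cs).count '{' : Int) = (cs.count '{' : Int) - 1 := by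
        omega
      rw [hd]
      congr 1
      rw [pvSkip_append hna, pvSkip_append hna]
      congr 1
      have : pvSkip ((cs.count '{' : Int) - (cs.count '}' : Int)) ('{' :: b)
          = pvSkip ((cs.count '{' : Int) - (cs.count '}' : Int) - 1) b := by
        rw [pvSkip, if_pos ⟨by omega, rfl⟩]
      rw [this]
      congr 1
      omega
    · rw [dif_neg hg]
      have hz : (cs.count '{' : Int) - (cs.count '}' : Int) = 0 := by omega
      rw [hz, pvSkip_zero, List.reverse_reverse]

theorem pvPass1_snd : ∀ (l : List Char) (s : Int), 0 ≤ s →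
    (pvPass1 s l).2 = s + ((pvPass1 s l).1.count '{' : Int) - ((pvPass1 s l).1.count '}' : Int)
      ∧ 0 ≤ (pvPass1 s l).2 := by
  intro l
  induction l with
  | nil => intro s hs; simp [pvPass1, hs]
  | cons c cs ih =>
    intro s hs
    by_cases h1 : c = '{'
    · subst h1
      obtain ⟨e1, e2⟩ := ih (s + 1) (by omega)
      refine ⟨?_, by simpa [pvPass1] using e2⟩
      simp [pvPass1, List.count_cons, e1]
      omega
    · by_cases h2 : c = '}'
      · subst h2
        by_cases h3 : s = 0
        · subst h3
          obtain ⟨e1, e2⟩ := ih 0 (by omega)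
          simp [pvPass1]
          exact ⟨by omega, e2⟩
        · obtain ⟨e1, e2⟩ := ih (s - 1) (by omega)
          refine ⟨?_, by simpa [pvPass1, h3] using e2⟩
          simp [pvPass1, h3, List.count_cons, e1]
          omega
      · obtain ⟨e1, e2⟩ := ih s hs
        refine ⟨?_, by simpa [pvPass1, h1, h2] using e2⟩
        simp [pvPass1, h1, h2, List.count_cons, e1]

theorem pvFoldA_eq : ∀ (l : List Char) (acc : List Char) (i s : Int), 0 ≤ s →
    (PySem.List.enumerate l i).foldl pvLoopA (acc, s)
      = (acc ++ (pvPass1 s l).1, (pvPass1 s l).2) := by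
  intro l
  induction l with
  | nil => intro acc i s hs; simp [PySem.List.enumerate_nil, pvPass1]
  | cons c cs ih =>
    intro acc i s hs
    rw [PySem.List.enumerate_cons, List.foldl_cons]
    by_cases h1 : c = '{'
    · have : pvLoopA (acc, s) (i, c) = (acc ++ [c], s + 1) := by simp [pvLoopA, h1]
      rw [this, ih (acc ++ [c]) (i + 1) (s + 1) (by omega)]
      simp [pvPass1, h1]
    · by_cases h2 : c = '}'
      · by_cases h3 : s = 0
        · have : pvLoopA (acc, s) (i, c) = (acc, s) := by
            simp [pvLoopA, h2, h3]
          rw [this, ih acc (i + 1) s hs]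
          simp [pvPass1, h2, h3]
        · have hpos : s > 0 := by omega
          have : pvLoopA (acc, s) (i, c) = (acc ++ [c], s - 1) := by
            simp [pvLoopA, h2, hpos]
          rw [this, ih (acc ++ [c]) (i + 1) (s - 1) (by omega)]
          simp [pvPass1, h2, h3]
      · have : pvLoopA (acc, s) (i, c) = (acc ++ [c], s) := by simp [pvLoopA, h1, h2]
        rw [this, ih (acc ++ [c]) (i + 1) s hs]
        simp [pvPass1, h1, h2]

-- ===== VERDICT (by name: the statement is the Claim_ definition above) =====
theorem clean_unmatched_braces_spec : Claim_equal_clean_unmatched_braces := by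
  unfold Claim_equal_clean_unmatched_braces
  intro template _
  unfold Spec_clean_unmatched_braces clean_unmatched_braces clean_unmatched_braces_alt
  rw [pvFoldA_eq template.toList [] 0 0 (le_refl 0)]
  obtain ⟨e1, e2⟩ := pvPass1_snd template.toList 0 (le_refl 0)
  simp only [List.nil_append]
  split_ifs with hg
  · -- brace-free template: the fast path returns it unchanged, and so does A
    have h1 : '{' ∉ template.toList := pvNotMem_of_isIn_false hg.1
    have h2 : '}' ∉ template.toList := pvNotMem_of_isIn_false hg.2
    rw [pvPass1_no_brace template.toList h1 h2 0]
    rw [pvRemoveLoop, dif_neg (by simp [List.count_eq_zero.mpr h1])]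
    exact String.ofList_toList
  rw [pvDropOpens_eq, List.append_nil]
  rw [pvRemoveLoop_eq ((pvPass1 0 template.toList).1.count '{') _ rfl (by omega)]
  rw [show (((pvPass1 0 template.toList).1.count '{' : Int)
      - ((pvPass1 0 template.toList).1.count '}' : Int)) = (pvPass1 0 template.toList).2
    from by omega]
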